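-- pv_equiv track=rewrite | github.com/SachaYT1/repetitor | умскул 2 часть/27.py | count_pairs_not_efficient
-- ===== SOURCE A (Python) =====
-- def count_pairs_not_efficient(numbers):
--     count = 0
--     for i in range(len(numbers)):
--         for j in range(i + 1, len(numbers)):
--             product = numbers[i] * numbers[j]
--             if (product % 3 == 0 or product % 7 == 0) and not (product % 3 == 0 and product % 7 == 0):
--                 count += 1
--     return count
-- ===== SOURCE B (Python) =====
-- def count_pairs_not_efficient(numbers):
--     # One pass: classify each number by divisibility flags (3,7) and combine
--     # with running bucket counts; O(n) instead of A's O(n^2).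
--     c00 = c3 = c7 = 0
--     total = 0
--     for x in numbers:
--         d3 = x % 3 == 0
--         d7 = x % 7 == 0
--         if d3 and d7:
--             pass  # pairs with a multiple of 21 are never counted
--         elif d3:
--             total += c3 + c00
--             c3 += 1
--         elif d7:
--             total += c7 + c00
--             c7 += 1
--         else:
--             total += c3 + c7
--             c00 += 1
--     return total
-- ===== Notes on version B (the rewrite author's own statement) =====
-- stated objective: faster
-- what changed: Replaced the O(n^2) double loop over index pairs by a single pass that classifies each number by its (divisible-by-3, divisible-by-7) flags and adds the matching running bucket counts, using that 3 and 7 are prime so the product's divisibility depends only on the factors' flags.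
import Mathlib
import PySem

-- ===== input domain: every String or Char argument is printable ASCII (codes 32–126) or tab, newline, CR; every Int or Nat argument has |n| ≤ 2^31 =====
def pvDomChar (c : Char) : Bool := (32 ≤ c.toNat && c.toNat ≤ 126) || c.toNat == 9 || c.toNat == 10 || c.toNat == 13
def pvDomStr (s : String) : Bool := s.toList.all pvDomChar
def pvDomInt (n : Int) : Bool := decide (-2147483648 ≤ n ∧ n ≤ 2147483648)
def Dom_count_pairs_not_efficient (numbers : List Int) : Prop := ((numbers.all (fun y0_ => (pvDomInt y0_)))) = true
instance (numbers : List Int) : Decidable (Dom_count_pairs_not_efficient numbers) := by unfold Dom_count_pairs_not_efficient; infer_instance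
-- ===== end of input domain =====

-- B replaces A's O(n^2) double loop by a single pass over the list that classifies
-- each number by its (divisible-by-3, divisible-by-7) flags and adds the matching
-- running bucket counts (objective: faster, asymptotic O(n)).

-- ===== PORT A =====
-- indices i, j produced by the ranges are always in bounds, so pyGetD is exact for numbers[i]/numbers[j]
def count_pairs_not_efficient (numbers : List Int) : Int :=
  (PySem.List.pyRange 0 (PySem.List.len numbers) 1).foldl
    (fun count i =>
      (PySem.List.pyRange (i + 1) (PySem.List.len numbers) 1).foldl
        (fun count j =>
          let product := PySem.List.pyGetD numbers i 0 * PySem.List.pyGetD numbers j 0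
          if (PySem.Int.mod product 3 == 0 || PySem.Int.mod product 7 == 0)
              && !(PySem.Int.mod product 3 == 0 && PySem.Int.mod product 7 == 0)
          then count + 1 else count)
        count)
    0

-- ===== PORT B =====
def count_pairs_not_efficient_alt (numbers : List Int) : Int :=
  (numbers.foldl
    (fun (s : Int × Int × Int × Int) x =>
      let c00 := s.1
      let c3 := s.2.1
      let c7 := s.2.2.1
      let total := s.2.2.2
      let d3 := PySem.Int.mod x 3 == 0
      let d7 := PySem.Int.mod x 7 == 0
      if d3 && d7 then (c00, c3, c7, total)
      else if d3 then (c00, c3 + 1, c7, total + c3 + c00)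
      else if d7 then (c00, c3, c7 + 1, total + c7 + c00)
      else (c00 + 1, c3, c7, total + c3 + c7))
    (0, 0, 0, 0)).2.2.2

-- ===== PRECONDITION & SPEC =====
def Spec_count_pairs_not_efficient (numbers : List Int) (out : Int) : Prop := out = count_pairs_not_efficient_alt numbers
instance (numbers : List Int) (out : Int) : Decidable (Spec_count_pairs_not_efficient numbers out) := by unfold Spec_count_pairs_not_efficient; infer_instance

-- ===== CLAIM (what is proved, stated in full; the proofs are below) =====
def Claim_equal_count_pairs_not_efficient : Prop := ∀ (numbers : List Int), Dom_count_pairs_not_efficient numbers → Spec_count_pairs_not_efficient numbers (count_pairs_not_efficient numbers)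

-- ===== LEMMAS AND PROOFS =====

-- divisibility flags of a single number, exactly as both ports test them
def pvD3 (x : Int) : Bool := PySem.Int.mod x 3 == 0
def pvD7 (x : Int) : Bool := PySem.Int.mod x 7 == 0

-- A's pair condition on the product x*y
def pvP (x y : Int) : Bool :=
  (PySem.Int.mod (x * y) 3 == 0 || PySem.Int.mod (x * y) 7 == 0)
    && !(PySem.Int.mod (x * y) 3 == 0 && PySem.Int.mod (x * y) 7 == 0)

-- number of qualifying unordered pairs, structurally
def pvPairs : List Int → Int
  | [] => 0
  | x :: xs => (xs.countP (fun y => pvP x y) : Int) + pvPairs xs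

-- bucket counts
def pvM3 (xs : List Int) : Int := xs.countP (fun y => pvD3 y && !pvD7 y)
def pvM7 (xs : List Int) : Int := xs.countP (fun y => !pvD3 y && pvD7 y)
def pvM0 (xs : List Int) : Int := xs.countP (fun y => !pvD3 y && !pvD7 y)

lemma pvD3_mul (x y : Int) : pvD3 (x * y) = (pvD3 x || pvD3 y) := by
  rw [Bool.eq_iff_iff]
  simp [pvD3, Int.prime_three.dvd_mul]

lemma prime_seven_int : Prime (7 : Int) := Int.prime_iff_natAbs_prime.mpr (by norm_num)

lemma pvD7_mul (x y : Int) : pvD7 (x * y) = (pvD7 x || pvD7 y) := by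
  rw [Bool.eq_iff_iff]
  simp [pvD7, prime_seven_int.dvd_mul]

lemma pvP_eq (x y : Int) :
    pvP x y = ((pvD3 x || pvD3 y) ^^ (pvD7 x || pvD7 y)) := by
  have h : pvP x y = ((pvD3 (x * y) || pvD7 (x * y)) && !(pvD3 (x * y) && pvD7 (x * y))) := rfl
  rw [h, pvD3_mul, pvD7_mul]
  cases pvD3 x <;> cases pvD3 y <;> cases pvD7 x <;> cases pvD7 y <;> rfl

lemma pvM3_cons (y : Int) (ys : List Int) :
    pvM3 (y :: ys) = pvM3 ys + (if pvD3 y && !pvD7 y then 1 else 0) := by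
  simp [pvM3, List.countP_cons]

lemma pvM7_cons (y : Int) (ys : List Int) :
    pvM7 (y :: ys) = pvM7 ys + (if !pvD3 y && pvD7 y then 1 else 0) := by
  simp [pvM7, List.countP_cons]

lemma pvM0_cons (y : Int) (ys : List Int) :
    pvM0 (y :: ys) = pvM0 ys + (if !pvD3 y && !pvD7 y then 1 else 0) := by
  simp [pvM0, List.countP_cons]

-- the inner count for a fixed x, in terms of the buckets of xs
lemma pvCntP (x : Int) (xs : List Int) :
    ((xs.countP (fun y => pvP x y)) : Int) =
      if pvD3 x then (if pvD7 x then 0 else pvM3 xs + pvM0 xs)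
      else (if pvD7 x then pvM7 xs + pvM0 xs else pvM3 xs + pvM7 xs) := by
  induction xs with
  | nil => simp [pvM3, pvM7, pvM0]
  | cons y ys ih =>
    have hc : ((List.countP (fun y => pvP x y) (y :: ys)) : Int)
        = ((List.countP (fun y => pvP x y) ys) : Int) + (if pvP x y then 1 else 0) := by
      simp [List.countP_cons]
    rw [hc, ih, pvM3_cons, pvM7_cons, pvM0_cons, pvP_eq]
    cases h3x : pvD3 x <;> cases h7x : pvD7 x <;>
      cases h3y : pvD3 y <;> cases h7y : pvD7 y <;> simp <;> ring

-- the B loop invariant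
lemma pvB_loop (xs : List Int) : ∀ (c0 c3 c7 t : Int),
    (xs.foldl
      (fun (s : Int × Int × Int × Int) x =>
        let c00 := s.1
        let c3 := s.2.1
        let c7 := s.2.2.1
        let total := s.2.2.2
        let d3 := PySem.Int.mod x 3 == 0
        let d7 := PySem.Int.mod x 7 == 0
        if d3 && d7 then (c00, c3, c7, total)
        else if d3 then (c00, c3 + 1, c7, total + c3 + c00)
        else if d7 then (c00, c3, c7 + 1, total + c7 + c00)
        else (c00 + 1, c3, c7, total + c3 + c7))
      (c0, c3, c7, t)).2.2.2
      = t + pvPairs xs + c3 * (pvM3 xs + pvM0 xs) + c7 * (pvM7 xs + pvM0 xs)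
          + c0 * (pvM3 xs + pvM7 xs) := by
  induction xs with
  | nil => intro c0 c3 c7 t; simp [pvPairs, pvM3, pvM7, pvM0]
  | cons x xs ih =>
    intro c0 c3 c7 t
    have hpairs : pvPairs (x :: xs)
        = ((xs.countP (fun y => pvP x y)) : Int) + pvPairs xs := rfl
    rw [List.foldl_cons]
    simp only []
    have h3 : (PySem.Int.mod x 3 == 0) = pvD3 x := rfl
    have h7 : (PySem.Int.mod x 7 == 0) = pvD7 x := rfl
    rw [h3, h7]
    cases hd3 : pvD3 x <;> cases hd7 : pvD7 x <;>
      simp only [Bool.and_false, Bool.and_true, Bool.and_self,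
        if_true, if_false, Bool.false_eq_true] <;>
      rw [ih] <;>
      rw [hpairs, pvCntP, pvM3_cons, pvM7_cons, pvM0_cons, hd3, hd7] <;>
      simp <;> ring

lemma pvB_eq_pairs (numbers : List Int) :
    count_pairs_not_efficient_alt numbers = pvPairs numbers := by
  unfold count_pairs_not_efficient_alt
  rw [pvB_loop]
  ring

-- the A loop, from index a = length - k to the end
lemma pvA_loop (numbers : List Int) : ∀ (k : Nat), k ≤ numbers.length → ∀ (t : Int),
    (PySem.List.pyRange ((numbers.length - k : Nat) : Int) (PySem.List.len numbers) 1).foldl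
      (fun count i =>
        (PySem.List.pyRange (i + 1) (PySem.List.len numbers) 1).foldl
          (fun count j =>
            let product := PySem.List.pyGetD numbers i 0 * PySem.List.pyGetD numbers j 0
            if (PySem.Int.mod product 3 == 0 || PySem.Int.mod product 7 == 0)
                && !(PySem.Int.mod product 3 == 0 && PySem.Int.mod product 7 == 0)
            then count + 1 else count)
          count)
      t
      = t + pvPairs (numbers.drop (numbers.length - k)) := by
  intro k
  induction k with
  | zero =>
    intro _ t
    rw [PySem.List.pyRange_one_eq_nil (by simp [PySem.List.len])]
    simp [pvPairs]
  | succ k ih =>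
    intro hk t
    have hlen : PySem.List.len numbers = (numbers.length : Int) := by
      simp [PySem.List.len]
    have ha : ((numbers.length - (k + 1) : Nat) : Int) < PySem.List.len numbers := by
      rw [hlen]; omega
    rw [PySem.List.pyRange_one_cons ha, List.foldl_cons]
    -- the inner loop: j runs over a+1 .. len
    have hsucc : ((numbers.length - (k + 1) : Nat) : Int) + 1
        = ((numbers.length - k : Nat) : Int) := by omega
    set a : Int := ((numbers.length - (k + 1) : Nat) : Int) with hadef
    have hinner : ∀ (t' : Int),
        (PySem.List.pyRange (a + 1) (PySem.List.len numbers) 1).foldl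
          (fun count j =>
            let product := PySem.List.pyGetD numbers a 0 * PySem.List.pyGetD numbers j 0
            if (PySem.Int.mod product 3 == 0 || PySem.Int.mod product 7 == 0)
                && !(PySem.Int.mod product 3 == 0 && PySem.Int.mod product 7 == 0)
            then count + 1 else count)
          t'
        = t' + ((numbers.drop (numbers.length - k)).countP
            (fun y => pvP (PySem.List.pyGetD numbers a 0) y) : Int) := by
      intro t'
      have e1 : (fun (count j : Int) =>
            let product := PySem.List.pyGetD numbers a 0 * PySem.List.pyGetD numbers j 0
            if (PySem.Int.mod product 3 == 0 || PySem.Int.mod product 7 == 0)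
                && !(PySem.Int.mod product 3 == 0 && PySem.Int.mod product 7 == 0)
            then count + 1 else count)
          = (fun (count j : Int) =>
            (fun (c y : Int) => if pvP (PySem.List.pyGetD numbers a 0) y then c + 1 else c)
              count (PySem.List.pyGetD numbers j 0)) := rfl
      rw [e1, PySem.List.foldl_pyRange_pyGetD numbers 0
        (fun (c y : Int) =>
          if pvP (PySem.List.pyGetD numbers a 0) y then c + 1 else c) t'
        (a := a + 1) (by omega)]
      rw [PySem.List.foldl_count_if]
      have e2 : (a + 1).toNat = numbers.length - k := by omega
      rw [e2]
    rw [hinner t, hsucc, ih (by omega)]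
    have hdrop : numbers.drop (numbers.length - (k + 1))
        = PySem.List.pyGetD numbers a 0 :: numbers.drop (numbers.length - k) := by
      have hlt : numbers.length - (k + 1) < numbers.length := by omega
      rw [List.drop_eq_getElem_cons hlt]
      congr 1
      · rw [PySem.List.pyGetD_eq_getElem numbers (i := a) 0 (by omega) (by omega)]
        congr 1
      · congr 1
        omega
    rw [hdrop]
    show _ = t + (((numbers.drop (numbers.length - k)).countP
        (fun y => pvP (PySem.List.pyGetD numbers a 0) y) : Int)
        + pvPairs (numbers.drop (numbers.length - k)))
    ring

lemma pvA_eq_pairs (numbers : List Int) :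
    count_pairs_not_efficient numbers = pvPairs numbers := by
  unfold count_pairs_not_efficient
  have h := pvA_loop numbers numbers.length (le_refl _) 0
  simp only [Nat.sub_self, Nat.cast_zero, List.drop_zero] at h
  rw [h]
  ring

-- ===== VERDICT (by name: the statement is the Claim_ definition above) =====
theorem count_pairs_not_efficient_spec : Claim_equal_count_pairs_not_efficient := by
  intro numbers _
  unfold Spec_count_pairs_not_efficient
  rw [pvA_eq_pairs, pvB_eq_pairs]
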